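-- pv_equiv track=rewrite | github.com/OlaStawarz/SPD | RPQ/schrage.py | funkcjaStrat
-- ===== SOURCE A (Python) =====
-- def funkcjaStrat(data):
--     max_time_q = sum(data[0])  # bieżący czas dostarczenia zadania
--     time = data[0][0] + data[0][1]
--     C = []
--     C.append(time)
--     for t in range(1, len(data)):
--         if time > data[t][0]:
--             time = time + data[t][1]
--         else:
--             time = data[t][0] + data[t][1]
--
--         time_q = data[t][2] + time
--         max_time_q = max(max_time_q, time_q)
--         C.append(max_time_q)
--     return C
-- ===== SOURCE B (Python) =====
-- def funkcjaStrat(data):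
--     # prefix sums of processing times: P[j] = p_0 + ... + p_{j-1}
--     P = [0]
--     for job in data:
--         P.append(P[-1] + job[1])
--     # completion of job j in slack form: comp_j = P[j+1] + max_{k<=j}(r_k - P[k]),
--     # avoiding the max(prev, r_j) + p_j recurrence entirely
--     slack = data[0][0] - P[0]
--     C = [data[0][0] + data[0][1]]
--     running = sum(data[0])
--     for j in range(1, len(data)):
--         slack = max(slack, data[j][0] - P[j])
--         comp = slack + P[j + 1]
--         running = max(running, comp + data[j][2])
--         C.append(running)
--     return C
-- ===== Notes on version B (the rewrite author's own statement) =====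
-- stated objective: alternative
-- what changed: B replaces A's completion-time recurrence time = max(time, r_j) + p_j by a prefix-sum/slack reformulation: it precomputes prefix sums P of processing times and maintains the running maximum slack of r_k - P[k], so each completion is comp_j = slack + P[j+1]; the delivery maximum is then taken over these algebraically-derived completions.
import Mathlib
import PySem

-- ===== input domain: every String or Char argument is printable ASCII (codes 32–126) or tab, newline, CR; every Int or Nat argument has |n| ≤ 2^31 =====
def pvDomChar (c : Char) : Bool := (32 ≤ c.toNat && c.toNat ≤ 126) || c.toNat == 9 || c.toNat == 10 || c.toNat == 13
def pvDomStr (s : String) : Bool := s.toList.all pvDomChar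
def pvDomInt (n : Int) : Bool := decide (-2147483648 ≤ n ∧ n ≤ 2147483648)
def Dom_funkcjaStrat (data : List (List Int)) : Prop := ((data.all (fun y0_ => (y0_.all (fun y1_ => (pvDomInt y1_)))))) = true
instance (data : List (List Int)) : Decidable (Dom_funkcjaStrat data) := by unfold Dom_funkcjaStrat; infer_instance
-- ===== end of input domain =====

-- B replaces A's completion recurrence max(time, r_j) + p_j by prefix sums of processing
-- times plus a running maximum of release slacks r_k - P[k]; same O(n) cost, different algorithm.

-- ===== PORT A =====
-- the body of A's for-loop (state = (time, max_time_q, C))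
def aBody (data : List (List Int)) (st : Int × Int × List Int) (t : Int) : Int × Int × List Int :=
  let row := PySem.List.pyGetD data t []
  let time' := if st.1 > PySem.List.pyGetD row 0 0
    then st.1 + PySem.List.pyGetD row 1 0
    else PySem.List.pyGetD row 0 0 + PySem.List.pyGetD row 1 0
  let time_q := PySem.List.pyGetD row 2 0 + time'
  let mtq := max st.2.1 time_q
  (time', mtq, st.2.2 ++ [mtq])

def funkcjaStrat (data : List (List Int)) : List Int :=
  let row0 := PySem.List.pyGetD data 0 []
  let max_time_q := row0.sum
  let time := PySem.List.pyGetD row0 0 0 + PySem.List.pyGetD row0 1 0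
  let st := (PySem.List.pyRange 1 data.length 1).foldl (aBody data) (time, max_time_q, [time])
  st.2.2

-- ===== PORT B =====
-- Source B's first loop: P.append(P[-1] + job[1])
def pStep (P : List Int) (job : List Int) : List Int :=
  P ++ [PySem.List.pyGetD P (-1) 0 + PySem.List.pyGetD job 1 0]

-- Source B's second loop body (state = (slack, running, C))
def bBody (data : List (List Int)) (P : List Int) (st : Int × Int × List Int) (j : Int) : Int × Int × List Int :=
  let slack' := max st.1 (PySem.List.pyGetD (PySem.List.pyGetD data j []) 0 0 - PySem.List.pyGetD P j 0)
  let comp := slack' + PySem.List.pyGetD P (j + 1) 0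
  let running' := max st.2.1 (comp + PySem.List.pyGetD (PySem.List.pyGetD data j []) 2 0)
  (slack', running', st.2.2 ++ [running'])

def funkcjaStrat_alt (data : List (List Int)) : List Int :=
  let P := data.foldl pStep [0]
  let row0 := PySem.List.pyGetD data 0 []
  let slack := PySem.List.pyGetD row0 0 0 - PySem.List.pyGetD P 0 0
  let C := [PySem.List.pyGetD row0 0 0 + PySem.List.pyGetD row0 1 0]
  let running := row0.sum
  let st := (PySem.List.pyRange 1 data.length 1).foldl (bBody data P) (slack, running, C)
  st.2.2

-- ===== PRECONDITION & SPEC =====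
-- Pre_ excludes exactly the inputs where the Python A raises IndexError:
-- empty data (data[0]), a first row shorter than 2 (data[0][1]) or a later row shorter than 3 (data[t][2]).
def Pre_funkcjaStrat (data : List (List Int)) : Prop :=
  data ≠ [] ∧ 2 ≤ (data.headD []).length ∧ ∀ r ∈ data.tail, 3 ≤ r.length
instance (data : List (List Int)) : Decidable (Pre_funkcjaStrat data) := by
  unfold Pre_funkcjaStrat; infer_instance

def pvWitness_funkcjaStrat : List (List Int) := [[1, 2, 3], [4, 5, 6]]

def Spec_funkcjaStrat (data : List (List Int)) (out : List Int) : Prop := out = funkcjaStrat_alt data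
instance (data : List (List Int)) (out : List Int) : Decidable (Spec_funkcjaStrat data out) := by unfold Spec_funkcjaStrat; infer_instance

-- ===== CLAIM (what is proved, stated in full; the proofs are below) =====
def Claim_equal_funkcjaStrat : Prop := ∀ (data : List (List Int)), Dom_funkcjaStrat data → Pre_funkcjaStrat data → Spec_funkcjaStrat data (funkcjaStrat data)

-- ===== LEMMAS AND PROOFS =====

-- The "rest of the schedule" recurrence, the common abstraction both proofs reduce to.
def chain (time mtq : Int) (rows : List (List Int)) : List Int :=
  match rows with
  | [] => []
  | r :: rs =>
    let time' := if time > PySem.List.pyGetD r 0 0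
      then time + PySem.List.pyGetD r 1 0
      else PySem.List.pyGetD r 0 0 + PySem.List.pyGetD r 1 0
    let mtq' := max mtq (PySem.List.pyGetD r 2 0 + time')
    mtq' :: chain time' mtq' rs

-- processing time of a row
def pOf (r : List Int) : Int := PySem.List.pyGetD r 1 0

-- partial sums starting from s (the tail of Source B's P list)
def psums (s : Int) (rows : List (List Int)) : List Int :=
  match rows with
  | [] => []
  | r :: rs => (s + pOf r) :: psums (s + pOf r) rs

def sumP (rows : List (List Int)) : Int := (rows.map pOf).sum

theorem foldP_eq (rows : List (List Int)) :
    ∀ (acc : List Int) (s : Int), PySem.List.pyGetD acc (-1) 0 = s →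
    rows.foldl pStep acc = acc ++ psums s rows := by
  induction rows with
  | nil => intro acc s _; simp [psums]
  | cons r rs ih =>
    intro acc s hs
    simp only [List.foldl_cons, pStep, hs, psums]
    rw [ih (acc ++ [s + PySem.List.pyGetD r 1 0]) (s + pOf r)
      (by rw [PySem.List.pyGetD_neg_one_append_singleton]; rfl)]
    simp [pOf, List.append_assoc]

theorem psums_get (rows : List (List Int)) :
    ∀ (s : Int) (j : ℕ), j ≤ rows.length →
    PySem.List.pyGetD (s :: psums s rows) ((j : ℕ) : Int) 0 = s + sumP (rows.take j) := by
  induction rows with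
  | nil =>
    intro s j hj
    have h0 : j = 0 := Nat.le_zero.mp (by simpa using hj)
    subst h0
    simp [sumP]
  | cons r rs ih =>
    intro s j hj
    cases j with
    | zero => simp [sumP]
    | succ k =>
      have hk : k ≤ rs.length := by simpa using hj
      have h2 := ih (s + pOf r) k hk
      rw [PySem.List.pyGetD_natCast] at h2 ⊢
      simp only [psums, List.getD_cons_succ, List.take_succ_cons, sumP,
        List.map_cons, List.sum_cons] at h2 ⊢
      rw [h2]; ring

theorem foldA_chain (data : List (List Int)) (rest : List (List Int)) :
    ∀ (j : ℕ) (time mtq : Int) (C : List Int), data.drop j = rest →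
    ((PySem.List.pyRange (j : Int) data.length 1).foldl (aBody data) (time, mtq, C)).2.2
      = C ++ chain time mtq rest := by
  induction rest with
  | nil =>
    intro j time mtq C h
    have hlen : data.length ≤ j := by
      simpa using List.drop_eq_nil_iff.mp h
    rw [PySem.List.pyRange_one_eq_nil (by exact_mod_cast hlen)]
    simp [chain]
  | cons r rs ih =>
    intro j time mtq C h
    have hj : j < data.length := by
      by_contra hle
      rw [List.drop_eq_nil_of_le (by omega)] at h
      simp at h
    have hget : data[j] = r := by
      have := List.getElem_cons_drop hj
      rw [h] at this
      exact (List.cons_eq_cons.mp this.symm).1.symm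
    have hdrop : data.drop (j + 1) = rs := by
      have := List.getElem_cons_drop hj
      rw [h] at this
      exact (List.cons_eq_cons.mp this.symm).2.symm
    rw [PySem.List.pyRange_one_cons (by exact_mod_cast hj)]
    rw [List.foldl_cons]
    have hrow : PySem.List.pyGetD data ((j : ℕ) : Int) [] = r := by
      rw [PySem.List.pyGetD_natCast]
      simp [List.getD, hget, List.getElem?_eq_getElem hj]
    simp only [aBody, hrow]
    have hcast : ((j : Int) + 1) = ((j + 1 : ℕ) : Int) := by push_cast; ring
    rw [hcast, ih (j + 1) _ _ _ hdrop]
    simp [chain, List.append_assoc]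

theorem foldB_chain (data : List (List Int)) (rest : List (List Int)) :
    ∀ (j : ℕ) (slack running : Int) (C : List Int), data.drop j = rest →
    ((PySem.List.pyRange (j : Int) data.length 1).foldl
        (bBody data (0 :: psums 0 data)) (slack, running, C)).2.2
      = C ++ chain (slack + sumP (data.take j)) running rest := by
  induction rest with
  | nil =>
    intro j slack running C h
    have hlen : data.length ≤ j := by
      simpa using List.drop_eq_nil_iff.mp h
    rw [PySem.List.pyRange_one_eq_nil (by exact_mod_cast hlen)]
    simp [chain]
  | cons r rs ih =>
    intro j slack running C h
    have hj : j < data.length := by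
      by_contra hle
      rw [List.drop_eq_nil_of_le (by omega)] at h
      simp at h
    have hget : data[j] = r := by
      have := List.getElem_cons_drop hj
      rw [h] at this
      exact (List.cons_eq_cons.mp this.symm).1.symm
    have hdrop : data.drop (j + 1) = rs := by
      have := List.getElem_cons_drop hj
      rw [h] at this
      exact (List.cons_eq_cons.mp this.symm).2.symm
    have htake : data.take (j + 1) = data.take j ++ [r] := by
      rw [List.take_add_one, List.getElem?_eq_getElem hj, hget]; rfl
    rw [PySem.List.pyRange_one_cons (by exact_mod_cast hj)]
    rw [List.foldl_cons]
    have hrow : PySem.List.pyGetD data ((j : ℕ) : Int) [] = r := by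
      rw [PySem.List.pyGetD_natCast]
      simp [List.getD, hget, List.getElem?_eq_getElem hj]
    have hPj : PySem.List.pyGetD (0 :: psums 0 data) ((j : ℕ) : Int) 0
        = sumP (data.take j) := by
      have := psums_get data 0 j (by omega); simpa using this
    have hPj1 : PySem.List.pyGetD (0 :: psums 0 data) (((j : ℕ) : Int) + 1) 0
        = sumP (data.take (j + 1)) := by
      have hc : ((j : Int) + 1) = ((j + 1 : ℕ) : Int) := by push_cast; ring
      rw [hc]
      have := psums_get data 0 (j + 1) (by omega); simpa using this
    have hsum : sumP (data.take (j + 1)) = sumP (data.take j) + pOf r := by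
      simp [htake, sumP]
    rw [hsum] at hPj1
    have hcast : ((j : Int) + 1) = ((j + 1 : ℕ) : Int) := by push_cast; ring
    simp only [bBody, hrow, hPj, hPj1]
    rw [hcast, ih (j + 1) _ _ _ hdrop, hsum]
    simp only [chain]
    have e1 : max slack (PySem.List.pyGetD r 0 0 - sumP (data.take j))
          + (sumP (data.take j) + pOf r)
        = (if slack + sumP (data.take j) > PySem.List.pyGetD r 0 0
            then slack + sumP (data.take j) + PySem.List.pyGetD r 1 0
            else PySem.List.pyGetD r 0 0 + PySem.List.pyGetD r 1 0) := by
      simp only [pOf]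
      rw [max_def]; split_ifs <;> omega
    rw [e1]
    have hcomm : ∀ a b c : Int, max a (b + c) = max a (c + b) := by intro a b c; omega
    rw [hcomm]
    simp [List.append_assoc]

-- ===== VERDICT (by name: the statement is the Claim_ definition above) =====
theorem funkcjaStrat_spec : Claim_equal_funkcjaStrat := by
  intro data _ hpre
  obtain ⟨hne, -, -⟩ := hpre
  cases data with
  | nil => exact absurd rfl hne
  | cons r0 rest =>
    show funkcjaStrat (r0 :: rest) = funkcjaStrat_alt (r0 :: rest)
    have hA := foldA_chain (r0 :: rest) rest 1
      (PySem.List.pyGetD r0 0 0 + PySem.List.pyGetD r0 1 0) r0.sum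
      [PySem.List.pyGetD r0 0 0 + PySem.List.pyGetD r0 1 0] (by simp)
    rw [Nat.cast_one] at hA
    have hP : (r0 :: rest).foldl pStep [0] = 0 :: psums 0 (r0 :: rest) := by
      have := foldP_eq (r0 :: rest) [0] 0 (by decide)
      simpa using this
    have hB := foldB_chain (r0 :: rest) rest 1
      (PySem.List.pyGetD r0 0 0 - 0) r0.sum
      [PySem.List.pyGetD r0 0 0 + PySem.List.pyGetD r0 1 0] (by simp)
    rw [Nat.cast_one] at hB
    have htime : PySem.List.pyGetD r0 0 0 - 0 + sumP ((r0 :: rest).take 1)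
        = PySem.List.pyGetD r0 0 0 + PySem.List.pyGetD r0 1 0 := by
      simp [sumP, pOf]
    rw [htime] at hB
    simp only [funkcjaStrat, PySem.List.pyGetD_zero_cons, hA,
      funkcjaStrat_alt, hP, PySem.List.pyGetD_zero_cons, hB]
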